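-- pv_equiv track=rewrite | github.com/marioalexandreantunes/py-rs-go | main.py | complex_calculation
-- ===== SOURCE A (Python) =====
-- def complex_calculation(n):
--     total = 0
--     for i in range(n):
--         total += i * i
--         if i % 2 == 0:
--             total += i
--         else:
--             total -= i
--     return total
-- ===== SOURCE B (Python) =====
-- def complex_calculation(n):
--     if n <= 0:
--         return 0
--     sq = (n - 1) * n * (2 * n - 1) // 6
--     alt = -(n // 2) if n % 2 == 0 else n // 2
--     return sq + alt
-- ===== Notes on version B (the rewrite author's own statement) =====
-- stated objective: faster
-- what changed: Replaced A's linear-time accumulation loop with a constant-time closed-form expression: the sum-of-squares formula plus the alternating linear term of half n with a parity-dependent sign.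
import Mathlib
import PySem

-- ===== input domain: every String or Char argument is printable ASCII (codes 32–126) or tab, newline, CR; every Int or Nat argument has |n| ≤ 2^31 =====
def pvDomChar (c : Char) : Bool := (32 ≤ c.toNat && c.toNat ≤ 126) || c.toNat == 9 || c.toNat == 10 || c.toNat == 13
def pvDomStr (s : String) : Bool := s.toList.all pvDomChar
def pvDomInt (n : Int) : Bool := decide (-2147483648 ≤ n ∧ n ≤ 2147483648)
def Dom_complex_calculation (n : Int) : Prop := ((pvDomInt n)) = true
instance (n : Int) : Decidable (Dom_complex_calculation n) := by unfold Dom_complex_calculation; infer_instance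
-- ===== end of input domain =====

-- B replaces A's O(n) loop by a closed-form O(1) formula (sum of squares + alternating linear term).

-- ===== PORT A =====
def complex_calculation (n : Int) : Int :=
  (PySem.List.pyRange 0 n 1).foldl (fun total i =>
    let total := total + i * i
    if PySem.Int.mod i 2 == 0 then total + i else total - i) 0

-- ===== PORT B =====
def complex_calculation_alt (n : Int) : Int :=
  if n ≤ 0 then 0
  else
    let sq := PySem.Int.floordiv ((n - 1) * n * (2 * n - 1)) 6
    let alt := if PySem.Int.mod n 2 == 0 then -(PySem.Int.floordiv n 2) else PySem.Int.floordiv n 2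
    sq + alt

-- ===== PRECONDITION & SPEC =====
def Spec_complex_calculation (n : Int) (out : Int) : Prop := out = complex_calculation_alt n
instance (n : Int) (out : Int) : Decidable (Spec_complex_calculation n out) := by unfold Spec_complex_calculation; infer_instance

-- ===== CLAIM (what is proved, stated in full; the proofs are below) =====
def Claim_equal_complex_calculation : Prop := ∀ (n : Int), Dom_complex_calculation n → Spec_complex_calculation n (complex_calculation n)

-- ===== LEMMAS AND PROOFS =====

-- the alternating term in Nat form
def pvAlt (m : Nat) : Int := if m % 2 = 0 then -((m / 2 : Nat) : Int) else ((m / 2 : Nat) : Int)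

lemma pvFold_mul_six (m : Nat) :
    6 * complex_calculation (m : Int) = ((m : Int) - 1) * m * (2 * m - 1) + 6 * pvAlt m := by
  induction m with
  | zero => simp [complex_calculation, pvAlt]
  | succ k ih =>
    have hsplit : PySem.List.pyRange 0 ((k + 1 : Nat) : Int) 1
        = PySem.List.pyRange 0 (k : Int) 1 ++ [(k : Int)] := by
      push_cast
      exact PySem.List.pyRange_one_succ_right (by positivity)
    unfold complex_calculation at ih ⊢
    rw [hsplit, List.foldl_append]
    simp only [List.foldl]
    have hmc : PySem.Int.mod (k : Int) 2 = ((k % 2 : Nat) : Int) := by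
      exact_mod_cast PySem.Int.mod_natCast k 2
    rcases Nat.even_or_odd k with ⟨j, hj⟩ | ⟨j, hj⟩
    · have hmod : PySem.Int.mod (k : Int) 2 = 0 := by
        rw [hmc]; have : k % 2 = 0 := by omega
        simp [this]
      rw [if_pos (by simp; omega)]
      have ha : pvAlt k = -((j : Nat) : Int) := by
        unfold pvAlt; subst hj
        have h1 : (j + j) % 2 = 0 := by omega
        have h2 : (j + j) / 2 = j := by omega
        simp [h1, h2]
      have ha' : pvAlt (k + 1) = ((j : Nat) : Int) := by
        unfold pvAlt; subst hj
        have h1 : (j + j + 1) % 2 = 1 := by omega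
        have h2 : (j + j + 1) / 2 = j := by omega
        simp [h1, h2]
      rw [ha] at ih
      rw [ha']
      subst hj
      push_cast at ih ⊢
      nlinarith [ih]
    · have hmod : PySem.Int.mod (k : Int) 2 = 1 := by
        rw [hmc]; have : k % 2 = 1 := by omega
        simp [this]
      rw [if_neg (by simp; omega)]
      have ha : pvAlt k = ((j : Nat) : Int) := by
        unfold pvAlt; subst hj
        have h1 : (2 * j + 1) % 2 = 1 := by omega
        have h2 : (2 * j + 1) / 2 = j := by omega
        simp [h1, h2]
      have ha' : pvAlt (k + 1) = -(((j + 1 : Nat)) : Int) := by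
        unfold pvAlt; subst hj
        have h1 : (2 * j + 1 + 1) % 2 = 0 := by omega
        have h2 : (2 * j + 1 + 1) / 2 = j + 1 := by omega
        simp [h1, h2]
      rw [ha] at ih
      rw [ha']
      subst hj
      push_cast at ih ⊢
      nlinarith [ih]

lemma pvFold_closed (m : Nat) :
    complex_calculation (m : Int)
      = PySem.Int.floordiv (((m : Int) - 1) * m * (2 * m - 1)) 6 + pvAlt m := by
  have h6 := pvFold_mul_six m
  have hP : ((m : Int) - 1) * m * (2 * m - 1) = 6 * (complex_calculation (m : Int) - pvAlt m) := by
    linarith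
  rw [PySem.Int.floordiv_eq_ediv_of_pos (by norm_num), hP]
  rw [Int.mul_ediv_cancel_left _ (by norm_num)]
  ring

-- ===== VERDICT (by name: the statement is the Claim_ definition above) =====
theorem complex_calculation_spec : Claim_equal_complex_calculation := by
  intro n _
  unfold Spec_complex_calculation complex_calculation_alt
  by_cases hn : n ≤ 0
  · rw [if_pos hn]
    unfold complex_calculation
    rw [PySem.List.pyRange_one_eq_nil hn]
    rfl
  · rw [if_neg hn]
    rw [not_le] at hn
    obtain ⟨m, rfl⟩ := Int.eq_ofNat_of_zero_le (le_of_lt hn)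
    rw [pvFold_closed m]
    have hfd : PySem.Int.floordiv (m : Int) 2 = ((m / 2 : Nat) : Int) := by
      exact_mod_cast PySem.Int.floordiv_natCast m 2
    have hmd : PySem.Int.mod (m : Int) 2 = ((m % 2 : Nat) : Int) := by
      exact_mod_cast PySem.Int.mod_natCast m 2
    congr 1
    unfold pvAlt
    rw [hmd, hfd]
    rcases Nat.even_or_odd m with h | h
    · have h0 : m % 2 = 0 := Nat.even_iff.mp h
      rw [h0]; norm_num
    · have h1 : m % 2 = 1 := Nat.odd_iff.mp h
      rw [h1]; norm_num
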